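-- pv_equiv track=rewrite | github.com/GuoCheng12/aie | src/graph/build_evidence_table_v1_p1.py | infer_condition_state
-- ===== SOURCE A (Python) =====
-- def infer_condition_state(field: str) -> str:
--     if field in {"absorption", "absorption_peak_nm"}:
--         return "sol"
--     for prefix in ("emission_", "qy_", "tau_"):
--         if field.startswith(prefix):
--             suffix = field[len(prefix):]
--             if suffix in {"sol", "solid", "aggr", "crys"}:
--                 return suffix
--     return "unknown"
-- ===== SOURCE B (Python) =====
-- def infer_condition_state(field: str) -> str:
--     if field in {"absorption", "absorption_peak_nm"}:
--         return "sol"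
--     head, _, tail = field.partition("_")
--     if head in {"emission", "qy", "tau"} and tail in {"sol", "solid", "aggr", "crys"}:
--         return tail
--     return "unknown"
-- ===== Notes on version B (the rewrite author's own statement) =====
-- stated objective: simpler
-- what changed: Replaces the prefix loop with startswith/len-slice by a single partition on the first underscore plus two membership tests on head and tail.
import Mathlib
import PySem

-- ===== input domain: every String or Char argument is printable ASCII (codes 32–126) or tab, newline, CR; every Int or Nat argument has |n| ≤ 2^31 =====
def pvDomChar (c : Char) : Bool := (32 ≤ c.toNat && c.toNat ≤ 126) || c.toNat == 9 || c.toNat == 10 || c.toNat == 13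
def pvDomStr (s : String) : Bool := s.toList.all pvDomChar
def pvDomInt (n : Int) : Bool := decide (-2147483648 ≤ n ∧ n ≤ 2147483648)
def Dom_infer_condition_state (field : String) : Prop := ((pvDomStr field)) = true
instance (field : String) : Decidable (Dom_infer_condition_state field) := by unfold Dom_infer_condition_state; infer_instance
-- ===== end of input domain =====

-- One line: B replaces A's prefix loop (startswith + len-slice) by one partition at the
-- first underscore plus membership tests on head and tail; objective: simpler.

-- ===== PORT A =====
-- the 'for prefix in (...)' loop: try each prefix in order, fall through when the
-- startswith test or the suffix-membership test fails
def pvLoopA (l : List Char) : List (List Char) → String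
  | [] => "unknown"
  | p :: rest =>
    if PySem.Chars.startswith l p then
      let suffix := PySem.List.slice l (some (p.length : Int)) none   -- field[len(prefix):]
      if suffix = "sol".toList ∨ suffix = "solid".toList ∨
         suffix = "aggr".toList ∨ suffix = "crys".toList then
        String.ofList suffix
      else pvLoopA l rest
    else pvLoopA l rest

def infer_condition_state (field : String) : String :=
  if field = "absorption" ∨ field = "absorption_peak_nm" then "sol"
  else pvLoopA field.toList ["emission_".toList, "qy_".toList, "tau_".toList]

-- ===== PORT B =====
def infer_condition_state_alt (field : String) : String :=
  if field = "absorption" ∨ field = "absorption_peak_nm" then "sol"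
  else
    -- head, _, tail = field.partition("_")  (split at the FIRST underscore; tail = "" if none)
    let head := field.toList.takeWhile (fun x => !decide (x = '_'))
    let tail := (field.toList.dropWhile (fun x => !decide (x = '_'))).tail
    if (head = "emission".toList ∨ head = "qy".toList ∨ head = "tau".toList) ∧
       (tail = "sol".toList ∨ tail = "solid".toList ∨
        tail = "aggr".toList ∨ tail = "crys".toList) then
      String.ofList tail
    else "unknown"

-- ===== PRECONDITION & SPEC =====
def Spec_infer_condition_state (field : String) (out : String) : Prop := out = infer_condition_state_alt field
instance (field : String) (out : String) : Decidable (Spec_infer_condition_state field out) := by unfold Spec_infer_condition_state; infer_instance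

-- ===== CLAIM (what is proved, stated in full; the proofs are below) =====
def Claim_equal_infer_condition_state : Prop := ∀ (field : String), Dom_infer_condition_state field → Spec_infer_condition_state field (infer_condition_state field)

-- ===== LEMMAS AND PROOFS =====

-- if B's branch data is present, the list literally decomposes as head ++ '_' :: tail
theorem pv_decomp (l : List Char)
    (h : (l.dropWhile (fun x => !decide (x = '_'))).tail ≠ []) :
    l = l.takeWhile (fun x => !decide (x = '_')) ++ '_' :: (l.dropWhile (fun x => !decide (x = '_'))).tail := by
  have hd : l.dropWhile (fun x => !decide (x = '_')) ≠ [] := by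
    intro h0; rw [h0] at h; simp at h
  obtain ⟨c, r, hcr⟩ := List.exists_cons_of_ne_nil hd
  have hc' : c = '_' := by
    have h2 := List.head_dropWhile_not (p := fun x : Char => !decide (x = '_')) (l := l) hd
    simp only [hcr, List.head_cons] at h2
    simpa using h2
  calc l = l.takeWhile (fun x => !decide (x = '_')) ++ l.dropWhile (fun x => !decide (x = '_')) := (List.takeWhile_append_dropWhile).symm
    _ = l.takeWhile (fun x => !decide (x = '_')) ++ '_' :: (l.dropWhile (fun x => !decide (x = '_'))).tail := by
        rw [hcr, hc']; simp

-- ===== VERDICT (by name: the statement is the Claim_ definition above) =====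
-- if the partition produced head p and a nonempty tail, l really starts with p ++ "_"
theorem pv_startswith_of_partition (l p : List Char)
    (hhead : l.takeWhile (fun x => !decide (x = '_')) = p) (htail : (l.dropWhile (fun x => !decide (x = '_'))).tail ≠ []) :
    PySem.Chars.startswith l (p ++ ['_']) = true := by
  rw [PySem.Chars.startswith_iff]
  refine ⟨(l.dropWhile (fun x => !decide (x = '_'))).tail, ?_⟩
  conv_rhs => rw [pv_decomp l htail, hhead]
  simp

theorem infer_condition_state_spec : Claim_equal_infer_condition_state := by
  intro field _
  unfold Spec_infer_condition_state infer_condition_state infer_condition_state_alt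
  by_cases hs : field = "absorption" ∨ field = "absorption_peak_nm"
  · simp [hs]
  · simp only [hs, if_false]
    set l := field.toList with hl
    clear_value l
    by_cases h1 : PySem.Chars.startswith l "emission_".toList
    · obtain ⟨r, rfl⟩ := (PySem.Chars.startswith_iff l _).mp h1
      have hsw : PySem.Chars.startswith ("emission_".toList ++ r) "emission_".toList = true := by
        rw [PySem.Chars.startswith_iff]; exact ⟨r, rfl⟩
      have hslice : PySem.List.slice ("emission_".toList ++ r) (some ((("emission_".toList).length : Nat) : Int)) none = r := by
        rw [PySem.List.slice_from_natCast]; simp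
      simp at hsw hslice
      simp [pvLoopA, hsw, hslice]
      by_cases hS : r = ['s','o','l'] ∨ r = ['s','o','l','i','d'] ∨ r = ['a','g','g','r'] ∨ r = ['c','r','y','s']
      · simp [hS]
      · have hq : PySem.Chars.startswith ('e'::'m'::'i'::'s'::'s'::'i'::'o'::'n'::'_'::r) ['q','y','_'] = false := by
          rw [← Bool.not_eq_true, PySem.Chars.startswith_iff]; rintro ⟨t, ht⟩; simp at ht
        have hta : PySem.Chars.startswith ('e'::'m'::'i'::'s'::'s'::'i'::'o'::'n'::'_'::r) ['t','a','u','_'] = false := by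
          rw [← Bool.not_eq_true, PySem.Chars.startswith_iff]; rintro ⟨t, ht⟩; simp at ht
        simp [hq, hta, hS]
    · by_cases h2 : PySem.Chars.startswith l "qy_".toList
      · obtain ⟨r, rfl⟩ := (PySem.Chars.startswith_iff l _).mp h2
        rw [Bool.not_eq_true] at h1
        have hsw : PySem.Chars.startswith ("qy_".toList ++ r) "qy_".toList = true := by
          rw [PySem.Chars.startswith_iff]; exact ⟨r, rfl⟩
        have hslice : PySem.List.slice ("qy_".toList ++ r) (some ((("qy_".toList).length : Nat) : Int)) none = r := by
          rw [PySem.List.slice_from_natCast]; simp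
        simp at h1 hsw hslice
        simp [pvLoopA, h1, hsw, hslice]
        by_cases hS : r = ['s','o','l'] ∨ r = ['s','o','l','i','d'] ∨ r = ['a','g','g','r'] ∨ r = ['c','r','y','s']
        · simp [hS]
        · have hta : PySem.Chars.startswith ('q'::'y'::'_'::r) ['t','a','u','_'] = false := by
            rw [← Bool.not_eq_true, PySem.Chars.startswith_iff]; rintro ⟨t, ht⟩; simp at ht
          simp [hta, hS]
      · by_cases h3 : PySem.Chars.startswith l "tau_".toList
        · obtain ⟨r, rfl⟩ := (PySem.Chars.startswith_iff l _).mp h3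
          rw [Bool.not_eq_true] at h1 h2
          have hsw : PySem.Chars.startswith ("tau_".toList ++ r) "tau_".toList = true := by
            rw [PySem.Chars.startswith_iff]; exact ⟨r, rfl⟩
          have hslice : PySem.List.slice ("tau_".toList ++ r) (some ((("tau_".toList).length : Nat) : Int)) none = r := by
            rw [PySem.List.slice_from_natCast]; simp
          simp at h1 h2 hsw hslice
          simp [pvLoopA, h1, h2, hsw, hslice]
        · rw [Bool.not_eq_true] at h1 h2 h3
          simp at h1 h2 h3
          simp [pvLoopA, h1, h2, h3]
          intro hh hS
          exfalso
          have htail : (l.dropWhile (fun x => !decide (x = '_'))).tail ≠ [] := by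
            rcases hS with h | h | h | h <;> simp [h]
          rcases hh with hh | hh | hh
          · have hsw' := pv_startswith_of_partition l _ hh htail
            simp at hsw'
            simp [hsw'] at h1
          · have hsw' := pv_startswith_of_partition l _ hh htail
            simp at hsw'
            simp [hsw'] at h2
          · have hsw' := pv_startswith_of_partition l _ hh htail
            simp at hsw'
            simp [hsw'] at h3
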